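-- pv_equiv track=rewrite | github.com/mikkelfo/CORE-BEHRT | data/tokenizer.py | extend_node_to_lower_levels
-- ===== SOURCE A (Python) =====
-- from typing import List, Dict, Tuple
--
-- def extend_node_to_lower_levels(node:Tuple)->List[Tuple]:
--     """Given a tuple, extend it to the lowest level, by replicating and adding 1s to the end of the tuple"""
--     row_ls = []
--     row_ls.append(node)
--     for i in range(node.__len__()-1):
--         new_node = node[:i+1] + (1,) + node[i+2:]
--         node = new_node
--         row_ls.append(new_node)
--     return row_ls
-- ===== SOURCE B (Python) =====
-- def extend_node_to_lower_levels(node):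
--     """Each row computed directly from the original tuple: row k = (node[0],) + (1,)*k + node[k+1:]."""
--     return [node] + [node[:1] + (1,) * k + node[k + 1:] for k in range(1, len(node))]
-- ===== Notes on version B (the rewrite author's own statement) =====
-- stated objective: simpler
-- what changed: Replaced the mutated running-tuple accumulator (each row derived from the previous one, with `node` reassigned inside the loop) by a direct closed-form comprehension where each row k is computed independently from the original tuple as node[:1] + (1,)*k + node[k+1:].
import Mathlib
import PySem

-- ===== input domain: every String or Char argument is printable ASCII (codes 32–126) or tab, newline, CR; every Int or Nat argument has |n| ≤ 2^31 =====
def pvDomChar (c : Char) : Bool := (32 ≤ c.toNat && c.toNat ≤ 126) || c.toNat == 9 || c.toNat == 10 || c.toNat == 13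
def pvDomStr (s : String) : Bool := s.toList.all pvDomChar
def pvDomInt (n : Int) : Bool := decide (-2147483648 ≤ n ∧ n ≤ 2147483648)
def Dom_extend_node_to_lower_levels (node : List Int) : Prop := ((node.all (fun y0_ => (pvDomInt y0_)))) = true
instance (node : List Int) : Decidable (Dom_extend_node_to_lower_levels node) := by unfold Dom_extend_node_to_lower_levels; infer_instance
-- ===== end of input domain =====

-- B replaces A's mutated running-tuple accumulator by independent closed-form rows (objective: simpler).

-- ===== PORT A =====
-- loop body: new_node = node[:i+1] + (1,) + node[i+2:]; node = new_node; row_ls.append(new_node)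
-- (i ranges over nonnegative naturals, so node[:i+1] = take (i+1) and node[i+2:] = drop (i+2) are exact)
def extend_node_to_lower_levels (node : List Int) : List (List Int) :=
  ((List.range (node.length - 1)).foldl
    (fun (s : List Int × List (List Int)) i =>
      let new_node := s.1.take (i + 1) ++ [1] ++ s.1.drop (i + 2)
      (new_node, s.2 ++ [new_node]))
    (node, [node])).2

-- ===== PORT B =====
-- [node] + [node[:1] + (1,)*k + node[k+1:] for k in range(1, len(node))]  (k ≥ 1 natural: slices exact)
def extend_node_to_lower_levels_alt (node : List Int) : List (List Int) :=
  [node] ++ (List.range' 1 (node.length - 1)).map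
    (fun k => node.take 1 ++ List.replicate k 1 ++ node.drop (k + 1))

-- ===== PRECONDITION & SPEC =====
def Spec_extend_node_to_lower_levels (node : List Int) (out : List (List Int)) : Prop := out = extend_node_to_lower_levels_alt node
instance (node : List Int) (out : List (List Int)) : Decidable (Spec_extend_node_to_lower_levels node out) := by unfold Spec_extend_node_to_lower_levels; infer_instance

-- ===== CLAIM (what is proved, stated in full; the proofs are below) =====
def Claim_equal_extend_node_to_lower_levels : Prop := ∀ (node : List Int), Dom_extend_node_to_lower_levels node → Spec_extend_node_to_lower_levels node (extend_node_to_lower_levels node)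

-- ===== LEMMAS AND PROOFS =====

def pvRow (node : List Int) (k : Nat) : List Int :=
  node.take 1 ++ List.replicate k 1 ++ node.drop (k + 1)

theorem pvRow_zero (node : List Int) : pvRow node 0 = node := by
  rcases node with _ | ⟨a, l⟩ <;> simp [pvRow]

-- one step of A's loop turns row m into row (m+1), when index m+1 is still inside the list
theorem pvRow_step (node : List Int) (m : Nat) (h : m + 2 ≤ node.length) :
    (pvRow node m).take (m + 1) ++ [1] ++ (pvRow node m).drop (m + 2)
      = pvRow node (m + 1) := by
  have hlen : ((node.take 1) ++ List.replicate m (1 : Int)).length = m + 1 := by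
    simp [List.length_take]; omega
  have htake : (pvRow node m).take (m + 1) = node.take 1 ++ List.replicate m 1 := by
    rw [pvRow, List.take_append, hlen]
    simp
    omega
  have hdrop : (pvRow node m).drop (m + 2) = node.drop (m + 2) := by
    rw [pvRow, List.drop_append, hlen]
    have h1 : m + 2 - (m + 1) = 1 := by omega
    have h2 : ((node.take 1 ++ List.replicate m (1 : Int))).drop (m + 2) = [] := by
      apply List.drop_eq_nil_of_le
      rw [hlen]; omega
    rw [h1, h2, List.drop_drop]
    simp
  rw [htake, hdrop, pvRow, List.replicate_succ']
  simp [List.append_assoc]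

-- invariant of A's fold: after m iterations the running tuple is row m and the output holds rows 0..m
theorem pvFold_inv (node : List Int) (m : Nat) (h : m ≤ node.length - 1) :
    (List.range m).foldl
      (fun (s : List Int × List (List Int)) i =>
        let new_node := s.1.take (i + 1) ++ [1] ++ s.1.drop (i + 2)
        (new_node, s.2 ++ [new_node]))
      (node, [node])
    = (pvRow node m, [node] ++ (List.range' 1 m).map (pvRow node)) := by
  induction m with
  | zero => simp [pvRow_zero]
  | succ m ih =>
    have hm : m ≤ node.length - 1 := by omega
    have hlen : m + 2 ≤ node.length := by omega
    rw [List.range_succ, List.foldl_append, ih hm]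
    simp only [List.foldl_cons, List.foldl_nil]
    rw [pvRow_step node m hlen, List.range'_concat]
    simp [List.map_append]
    rw [Nat.add_comm 1 m]

-- ===== VERDICT (by name: the statement is the Claim_ definition above) =====
theorem extend_node_to_lower_levels_spec : Claim_equal_extend_node_to_lower_levels := by
  intro node _
  unfold Spec_extend_node_to_lower_levels extend_node_to_lower_levels extend_node_to_lower_levels_alt
  rw [pvFold_inv node (node.length - 1) le_rfl]
  rfl
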